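-- pv_equiv track=rewrite | github.com/TPIOS/tpiosrpbot | awesome/plugins/ra.py | eventprop
-- ===== SOURCE A (Python) =====
-- def eventprop(dataString):
--     prop = ""
--     event = ""
--     for idx, ch in enumerate(list(dataString)[::-1]):
--         if ch.isdigit():
--             prop += ch
--         else:
--             event = dataString[:len(dataString)-idx]
--             break
--     return event, "".join(prop[::-1])
-- ===== SOURCE B (Python) =====
-- def eventprop(dataString):
--     split = 0
--     for i, ch in enumerate(dataString):
--         if not ch.isdigit():
--             split = i + 1
--     return dataString[:split], dataString[split:]
-- ===== Notes on version B (the rewrite author's own statement) =====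
-- stated objective: alternative
-- what changed: B replaces A's backward scan with early break and a reversed accumulated digit buffer by a single forward pass that only maintains an integer split index (last non-digit position + 1), then slices the string once at that index.
import Mathlib
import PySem

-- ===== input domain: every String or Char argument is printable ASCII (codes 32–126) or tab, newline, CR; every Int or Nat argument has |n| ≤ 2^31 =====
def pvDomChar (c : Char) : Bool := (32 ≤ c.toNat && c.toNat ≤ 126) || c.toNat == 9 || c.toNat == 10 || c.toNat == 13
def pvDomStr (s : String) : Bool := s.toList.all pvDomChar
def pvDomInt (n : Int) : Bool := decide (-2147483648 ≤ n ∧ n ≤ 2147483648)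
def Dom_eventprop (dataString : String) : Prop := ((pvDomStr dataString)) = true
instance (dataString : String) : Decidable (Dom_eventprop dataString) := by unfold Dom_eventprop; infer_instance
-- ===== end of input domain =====

-- B replaces A's backward scan (early break, reversed digit buffer) by a forward pass that
-- maintains only the split index, then slices once; same O(n) cost, different traversal.

-- ===== PORT A =====
-- for idx, ch in enumerate(list(dataString)[::-1]): accumulate digits into prop, break on
-- the first non-digit setting event = dataString[:len-idx]
def eventpropLoopA (ds : List Char) : List Char → Nat → List Char → List Char → List Char × List Char
  | [], _, prop, event => (event, prop)
  | ch :: rest, idx, prop, event =>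
    if PySem.Chars.isdigit ch then
      eventpropLoopA ds rest (idx + 1) (prop ++ [ch]) event
    else
      (PySem.List.slice ds none (some ((ds.length : Int) - (idx : Int))), prop)

def eventprop (dataString : String) : String × String :=
  let ds := dataString.toList
  let r := eventpropLoopA ds ds.reverse 0 [] []
  (String.ofList r.1, String.ofList r.2.reverse)

-- ===== PORT B =====
-- forward pass: split = i+1 at every non-digit; return dataString[:split], dataString[split:]
def eventpropLoopB : List Char → Nat → Nat → Nat
  | [], _, split => split
  | ch :: rest, i, split =>
    eventpropLoopB rest (i + 1) (if PySem.Chars.isdigit ch then split else i + 1)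

def eventprop_alt (dataString : String) : String × String :=
  let ds := dataString.toList
  let split := eventpropLoopB ds 0 0
  (String.ofList (PySem.List.slice ds none (some (split : Int))),
   String.ofList (PySem.List.slice ds (some (split : Int)) none))

-- ===== PRECONDITION & SPEC =====
def Spec_eventprop (dataString : String) (out : String × String) : Prop := out = eventprop_alt dataString
instance (dataString : String) (out : String × String) : Decidable (Spec_eventprop dataString out) := by unfold Spec_eventprop; infer_instance

-- ===== CLAIM (what is proved, stated in full; the proofs are below) =====
def Claim_equal_eventprop : Prop := ∀ (dataString : String), Dom_eventprop dataString → Spec_eventprop dataString (eventprop dataString)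

-- ===== LEMMAS AND PROOFS =====

theorem eventpropLoopA_spec (ds : List Char) (r : List Char) (idx : Nat) (prop event : List Char) :
    eventpropLoopA ds r idx prop event =
      if (r.takeWhile PySem.Chars.isdigit).length = r.length then (event, prop ++ r)
      else (PySem.List.slice ds none
              (some ((ds.length : Int) - ((idx : Int) + ((r.takeWhile PySem.Chars.isdigit).length : Int)))),
            prop ++ r.takeWhile PySem.Chars.isdigit) := by
  induction r generalizing idx prop with
  | nil => simp [eventpropLoopA]
  | cons ch rest ih =>
    by_cases h : PySem.Chars.isdigit ch
    · rw [eventpropLoopA, if_pos h, ih]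
      simp only [List.takeWhile_cons, h, if_pos, List.length_cons]
      split_ifs with h1 h2 h2
      · simp
      · omega
      · omega
      · rw [Prod.mk.injEq]
        refine ⟨?_, by simp⟩
        congr 2
        push_cast
        ring
    · rw [eventpropLoopA, if_neg h]
      simp only [List.takeWhile_cons, h]
      rw [if_neg (by simp)]
      simp

theorem tw_append_len (L : List Char) (ch : Char) :
    (List.takeWhile PySem.Chars.isdigit (L ++ [ch])).length =
      if (List.takeWhile PySem.Chars.isdigit L).length = L.length then
        (if PySem.Chars.isdigit ch = true then L.length + 1 else L.length)
      else (List.takeWhile PySem.Chars.isdigit L).length := by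
  rw [List.takeWhile_append]
  split_ifs with h1 h2
  · simp [h2]
  · simp [h2]
  · rfl

theorem eventpropLoopB_spec (r : List Char) (i sp : Nat) :
    eventpropLoopB r i sp =
      if (r.reverse.takeWhile PySem.Chars.isdigit).length = r.length then sp
      else i + (r.length - (r.reverse.takeWhile PySem.Chars.isdigit).length) := by
  induction r generalizing i sp with
  | nil => simp [eventpropLoopB]
  | cons ch rest ih =>
    have hle : (rest.reverse.takeWhile PySem.Chars.isdigit).length ≤ rest.length := by
      simpa using (List.takeWhile_sublist (l := rest.reverse)
        (p := PySem.Chars.isdigit)).length_le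
    rw [eventpropLoopB, ih, List.reverse_cons, List.length_cons, tw_append_len,
      List.length_reverse]
    by_cases h : PySem.Chars.isdigit ch = true
    · rw [if_pos h]
      split_ifs <;> omega
    · rw [if_neg h]
      split_ifs <;> omega

theorem drop_trailing (ds : List Char) :
    ds.drop (ds.length - (ds.reverse.takeWhile PySem.Chars.isdigit).length) =
      (ds.reverse.takeWhile PySem.Chars.isdigit).reverse := by
  set l := ds.reverse with hl
  set t := l.takeWhile PySem.Chars.isdigit with ht
  set d := l.dropWhile PySem.Chars.isdigit with hd
  have hsplit : ds = d.reverse ++ t.reverse := by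
    rw [← List.reverse_append, ht, hd, List.takeWhile_append_dropWhile, hl,
      List.reverse_reverse]
  have hlen : t.length + d.length = ds.length := by
    rw [← List.length_append, ht, hd, List.takeWhile_append_dropWhile, hl,
      List.length_reverse]
  have h2 : ds.length - t.length = d.reverse.length := by simp; omega
  rw [h2, hsplit, List.drop_left]

-- ===== VERDICT (by name: the statement is the Claim_ definition above) =====
theorem eventprop_spec : Claim_equal_eventprop := by
  intro s _
  unfold Spec_eventprop
  show eventprop s = eventprop_alt s
  simp only [eventprop, eventprop_alt]
  rw [eventpropLoopA_spec, eventpropLoopB_spec]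
  set ds := s.toList with hds
  set k := (ds.reverse.takeWhile PySem.Chars.isdigit).length with hk
  have hkle : k ≤ ds.length := by
    simpa [← hk] using (List.takeWhile_sublist (l := ds.reverse)
      (p := PySem.Chars.isdigit)).length_le
  by_cases hall : k = ds.length
  · rw [if_pos (by rw [List.length_reverse]; exact hall), if_pos hall]
    simp [PySem.List.slice_to, PySem.List.slice_from]
  · rw [if_neg (by simpa using hall), if_neg hall]
    have hcast : (ds.length : Int) - (((0 : Nat) : Int) + (k : Int))
        = ((ds.length - k : Nat) : Int) := by omega
    rw [Nat.zero_add, hcast]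
    simp only [PySem.List.slice_to_natCast, PySem.List.slice_from_natCast]
    rw [hk, drop_trailing]
    simp
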